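-- pv_equiv track=rewrite | github.com/QuRareLugene/ProgrammersTest | 프로그래머스/lv0/120842. 2차원으로 만들기/2차원으로 만들기.py | solution
-- ===== SOURCE A (Python) =====
-- def solution(num_list, n):
--     answer = []
--     chunk_count = len(num_list)//n
--     i=0
--     for count in range(chunk_count):
--         answer.append([])
--         for itemcount in range(n):
--             answer[count].append(num_list[i])
--             i+=1
--     return answer
-- ===== SOURCE B (Python) =====
-- def solution(num_list, n):
--     chunks = len(num_list) // n
--     return [num_list[j*n:(j+1)*n] for j in range(chunks)]
-- ===== Notes on version B (the rewrite author's own statement) =====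
-- stated objective: simpler
-- what changed: Replaces A's nested per-element loops with running index and in-place row mutation by a single comprehension over chunk indices that slices each row whole.
import Mathlib
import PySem

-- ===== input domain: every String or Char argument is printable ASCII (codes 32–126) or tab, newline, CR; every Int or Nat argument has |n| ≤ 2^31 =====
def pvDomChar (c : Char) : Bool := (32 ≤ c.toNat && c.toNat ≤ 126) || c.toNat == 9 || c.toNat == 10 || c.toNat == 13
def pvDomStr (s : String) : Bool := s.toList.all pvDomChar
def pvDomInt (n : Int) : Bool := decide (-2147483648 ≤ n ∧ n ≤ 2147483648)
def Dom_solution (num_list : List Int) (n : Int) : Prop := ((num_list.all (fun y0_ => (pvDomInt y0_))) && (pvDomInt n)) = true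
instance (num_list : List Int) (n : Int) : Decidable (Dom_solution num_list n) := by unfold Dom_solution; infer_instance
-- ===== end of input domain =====

-- B replaces A's nested per-element loops (running index i, in-place row mutation) by one
-- comprehension over chunk indices that slices each row whole: simpler, same values.

-- ===== PORT A =====
-- num_list[i] is ported as pyGetD … 0: inside Pre_ (n ≠ 0) the index i is provably always in
-- range whenever the inner body runs, so Python never raises there and the default is never used.
def solution (num_list : List Int) (n : Int) : List (List Int) :=
  let chunk_count := PySem.Int.floordiv (PySem.List.len num_list) n
  ((PySem.List.pyRange 0 chunk_count 1).foldl
    (fun (st : List (List Int) × Int) count =>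
      -- answer.append([]) then the inner loop appends num_list[i] to answer[count], i += 1
      (PySem.List.pyRange 0 n 1).foldl
        (fun (st2 : List (List Int) × Int) _itemcount =>
          (st2.1.modify count.toNat (fun row => row ++ [PySem.List.pyGetD num_list st2.2 0]),
           st2.2 + 1))
        (st.1 ++ [[]], st.2))
    (([] : List (List Int)), (0 : Int))).1

-- ===== PORT B =====
def solution_alt (num_list : List Int) (n : Int) : List (List Int) :=
  let chunks := PySem.Int.floordiv (PySem.List.len num_list) n
  (PySem.List.pyRange 0 chunks 1).map
    (fun j => PySem.List.slice num_list (some (j * n)) (some ((j + 1) * n)))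

-- ===== PRECONDITION & SPEC =====
-- Pre_ excludes exactly n = 0, where Python A raises ZeroDivisionError.
def Pre_solution (num_list : List Int) (n : Int) : Prop := n ≠ 0
instance (num_list : List Int) (n : Int) : Decidable (Pre_solution num_list n) := by
  unfold Pre_solution; infer_instance
def pvWitness_solution : List Int × Int := ([1, 2, 3, 4, 5, 6], 2)
def Spec_solution (num_list : List Int) (n : Int) (out : List (List Int)) : Prop := out = solution_alt num_list n
instance (num_list : List Int) (n : Int) (out : List (List Int)) : Decidable (Spec_solution num_list n out) := by unfold Spec_solution; infer_instance

-- ===== CLAIM (what is proved, stated in full; the proofs are below) =====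
def Claim_equal_solution : Prop := ∀ (num_list : List Int) (n : Int), Dom_solution num_list n → Pre_solution num_list n → Spec_solution num_list n (solution num_list n)

-- ===== LEMMAS AND PROOFS =====

-- the common value for n > 0: k rows, row j = num_list[j*n : j*n+n]
def pvRows (xs : List Int) (nN : Nat) (k : Nat) : List (List Int) :=
  (List.range k).map (fun j => (xs.drop (j * nN)).take nN)

-- the inner loop body of A (count fixed at Nat index c)
def pvInnerF (xs : List Int) (c : Nat) : List (List Int) × Int → List (List Int) × Int :=
  fun st2 => (st2.1.modify c (fun row => row ++ [PySem.List.pyGetD xs st2.2 0]), st2.2 + 1)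

-- a foldl whose body ignores the list element is an iterate
theorem pv_foldl_const {α β : Type} (f : β → β) (L : List α) (init : β) :
    L.foldl (fun s _ => f s) init = f^[L.length] init := by
  induction L generalizing init with
  | nil => rfl
  | cons x t ih => simp [List.foldl_cons, ih, Function.iterate_succ_apply]

theorem pv_modify_append_singleton {α : Type} (pre : List α) (row : α) (f : α → α) :
    (pre ++ [row]).modify pre.length f = pre ++ [f row] := by
  induction pre with
  | nil => rfl
  | cons x t ih =>
      have h : ((x :: t) ++ [row]).modify (x :: t).length f
          = x :: ((t ++ [row]).modify t.length f) := rfl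
      rw [h, ih]; rfl

theorem pv_inner_iter (xs : List Int) (c m : Nat) (pre : List (List Int)) (row : List Int)
    (i : Int) (hc : pre.length = c) :
    (pvInnerF xs c)^[m] (pre ++ [row], i) =
      (pre ++ [row ++ (List.range m).map (fun (t : Nat) => PySem.List.pyGetD xs (i + (t : Int)) 0)],
       i + (m : Int)) := by
  induction m generalizing row i with
  | zero => simp
  | succ m ih =>
      rw [Function.iterate_succ_apply]
      have h1 : pvInnerF xs c (pre ++ [row], i)
          = (pre ++ [row ++ [PySem.List.pyGetD xs i 0]], i + 1) := by
        simp [pvInnerF, ← hc, pv_modify_append_singleton]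
      rw [h1, ih]
      have hmap : (List.range (m + 1)).map (fun (t : Nat) => PySem.List.pyGetD xs (i + (t : Int)) 0)
          = PySem.List.pyGetD xs i 0 ::
            (List.range m).map (fun (t : Nat) => PySem.List.pyGetD xs (i + 1 + (t : Int)) 0) := by
        rw [List.range_succ_eq_map]
        simp only [List.map_cons, List.map_map, Nat.cast_zero, add_zero]
        refine congrArg₂ _ rfl ?_
        apply List.map_congr_left
        intro t _
        simp only [Function.comp_apply]
        congr 1
        push_cast
        ring
      refine Prod.ext ?_ ?_
      · simp [hmap]
      · push_cast; ring

theorem pv_row_val (xs : List Int) (i m : Nat) (h : i + m ≤ xs.length) :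
    (List.range m).map (fun (t : Nat) => PySem.List.pyGetD xs ((i : Int) + (t : Int)) 0) =
      (xs.drop i).take m := by
  apply List.ext_getElem
  · simp; omega
  · intro t h1 h2
    have ht : t < m := by simpa using h1
    have hidx : ((i : Int) + (t : Int)) = ((i + t : Nat) : Int) := by push_cast; ring
    simp only [List.getElem_map, List.getElem_range, hidx, PySem.List.pyGetD_natCast]
    rw [List.getElem_take, List.getElem_drop]
    exact (List.getD_eq_getElem xs 0 (by omega)).trans rfl

-- outer loop invariant, n > 0
theorem pv_outer (xs : List Int) (n : Int) (hn : 0 < n) (k : Nat)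
    (hk : (k : Int) ≤ PySem.Int.floordiv (PySem.List.len xs) n) :
    (List.map (fun (t : Nat) => (0 : Int) + (t : Int)) (List.range k)).foldl
      (fun (st : List (List Int) × Int) count =>
        (PySem.List.pyRange 0 n 1).foldl
          (fun (st2 : List (List Int) × Int) _itemcount =>
            (st2.1.modify count.toNat (fun row => row ++ [PySem.List.pyGetD xs st2.2 0]),
             st2.2 + 1))
          (st.1 ++ [[]], st.2))
      (([] : List (List Int)), (0 : Int))
    = (pvRows xs n.toNat k, (k : Int) * n) := by
  have hnn : ((n.toNat : Int)) = n := Int.toNat_of_nonneg (le_of_lt hn)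
  induction k with
  | zero => simp [pvRows]
  | succ k ih =>
      have hk' : (k : Int) ≤ PySem.Int.floordiv (PySem.List.len xs) n := by
        push_cast at hk ⊢; omega
      rw [List.range_succ, List.map_append, List.foldl_append, ih hk']
      simp only [List.map_cons, List.map_nil, List.foldl_cons, List.foldl_nil]
      have hbody :
          (fun (st2 : List (List Int) × Int) (_itemcount : Int) =>
            (st2.1.modify ((0 : Int) + (k : Int)).toNat
              (fun row => row ++ [PySem.List.pyGetD xs st2.2 0]), st2.2 + 1))
          = (fun s (_ : Int) => pvInnerF xs k s) := by
        funext st2 _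
        simp [pvInnerF]
      rw [hbody, pv_foldl_const]
      have hlen : (PySem.List.pyRange 0 n 1).length = n.toNat := by
        simp [PySem.List.length_pyRange_one (a := 0) (b := n)]
      have hpre : (pvRows xs n.toNat k).length = k := by simp [pvRows]
      rw [hlen, pv_inner_iter xs k n.toNat (pvRows xs n.toNat k) [] ((k : Int) * n) hpre]
      -- bound: k + 1 full chunks fit inside xs
      have hdm := PySem.Int.floordiv_mul_add_mod (PySem.List.len xs) n
      have hm0 := PySem.Int.mod_nonneg (PySem.List.len xs) hn
      have hxl : PySem.List.len xs = (xs.length : Int) := by simp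
      have h1 : ((k : Int) + 1) * n ≤ PySem.Int.floordiv (PySem.List.len xs) n * n := by
        refine mul_le_mul_of_nonneg_right ?_ (le_of_lt hn)
        push_cast at hk; linarith
      have h2 : PySem.Int.floordiv (PySem.List.len xs) n * n ≤ PySem.List.len xs := by
        linarith
      have h3 : (k : Int) * n + n ≤ (xs.length : Int) := by
        rw [hxl] at h2; nlinarith
      have hfit : k * n.toNat + n.toNat ≤ xs.length := by
        have : ((k * n.toNat + n.toNat : Nat) : Int) ≤ ((xs.length : Nat) : Int) := by
          push_cast [hnn]; linarith
        exact_mod_cast this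
      have hiv : ((k : Int) * n) = ((k * n.toNat : Nat) : Int) := by push_cast [hnn]; ring
      refine Prod.ext ?_ ?_
      · simp only [List.nil_append]
        rw [hiv, pv_row_val xs (k * n.toNat) n.toNat hfit]
        simp [pvRows, List.range_succ]
      · simp only []
        push_cast [hnn]
        ring

-- B equals pvRows for n > 0
theorem pv_alt_rows (xs : List Int) (n : Int) (hn : 0 < n) :
    solution_alt xs n = pvRows xs n.toNat (PySem.Int.floordiv (PySem.List.len xs) n).toNat := by
  unfold solution_alt pvRows
  dsimp only
  rw [PySem.List.pyRange_one]
  simp only [sub_zero, List.map_map]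
  apply List.map_congr_left
  intro j _
  simp only [Function.comp_apply]
  have hnn : ((n.toNat : Int)) = n := Int.toNat_of_nonneg (le_of_lt hn)
  have h1 : ((0 : Int) + (j : Int)) * n = ((j * n.toNat : Nat) : Int) := by push_cast [hnn]; ring
  have h2 : ((0 : Int) + (j : Int) + 1) * n
      = ((j * n.toNat : Nat) : Int) + ((n.toNat : Nat) : Int) := by push_cast [hnn]; ring
  rw [h1, h2, PySem.List.slice_natCast_add]

-- for n < 0 the chunk count is ≤ 0
theorem pv_cc_nonpos (xs : List Int) (n : Int) (hn : n < 0) :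
    PySem.Int.floordiv (PySem.List.len xs) n ≤ 0 := by
  by_contra h
  push Not at h
  have hdm := PySem.Int.floordiv_mul_add_mod (PySem.List.len xs) n
  have hmb := PySem.Int.mod_neg_bounds (PySem.List.len xs) hn
  have hlen : (0 : Int) ≤ PySem.List.len xs := by simp
  nlinarith [mul_neg_of_pos_of_neg h hn]

-- ===== VERDICT (by name: the statement is the Claim_ definition above) =====
theorem solution_spec : Claim_equal_solution := by
  intro num_list n _hdom hn
  unfold Spec_solution
  rcases lt_trichotomy n 0 with hlt | heq | hgt
  · -- n < 0 : chunk count ≤ 0, both loops run over the empty range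
    have hcc := pv_cc_nonpos num_list n hlt
    unfold solution solution_alt
    dsimp only
    rw [PySem.List.pyRange_one_eq_nil hcc]
    simp
  · exact absurd heq hn
  · -- n > 0
    have hcc : (0 : Int) ≤ PySem.Int.floordiv (PySem.List.len num_list) n := by
      have hdm := PySem.Int.floordiv_mul_add_mod (PySem.List.len num_list) n
      have hml := PySem.Int.mod_lt (PySem.List.len num_list) hgt
      have hlen : (0 : Int) ≤ PySem.List.len num_list := by simp
      nlinarith
    unfold solution
    dsimp only
    rw [PySem.List.pyRange_one 0 (PySem.Int.floordiv (PySem.List.len num_list) n)]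
    simp only [sub_zero]
    rw [pv_outer num_list n hgt (PySem.Int.floordiv (PySem.List.len num_list) n).toNat
      (by rw [Int.toNat_of_nonneg hcc])]
    rw [pv_alt_rows num_list n hgt]
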